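-- pv_equiv track=rewrite | github.com/phamcongtruongptit/Python_PTIT | submit_codeptit/PY01060_tichchusotongchuso.py | tich
-- ===== SOURCE A (Python) =====
-- def tich(s):
--     mul = 1
--     check = False
--     for i in range(len(s)):
--         if i%2 == 0:
--             if(int(s[i])!=0):
--                 mul*=int(s[i])
--                 check = True
--             else: continue
--     if check == False: return 0
--     else: return mul
-- ===== SOURCE B (Python) =====
-- def tich(s):
--     vals = []
--     rest = s
--     while rest:
--         c = rest[0]
--         if c != '0':
--             vals.append(int(c))
--         rest = rest[2:]
--     if not vals:
--         return 0
--     p = 1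
--     for v in vals:
--         p *= v
--     return p
-- ===== Notes on version B (the rewrite author's own statement) =====
-- stated objective: simpler
-- what changed: Replaces A's index loop with parity test and running check flag by a two-phase collect-then-multiply: a while loop over every-second-character suffixes (rest = rest[2:]) gathers the nonzero even-position digits into a list, then an emptiness test plus a product fold gives the result.
import Mathlib
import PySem

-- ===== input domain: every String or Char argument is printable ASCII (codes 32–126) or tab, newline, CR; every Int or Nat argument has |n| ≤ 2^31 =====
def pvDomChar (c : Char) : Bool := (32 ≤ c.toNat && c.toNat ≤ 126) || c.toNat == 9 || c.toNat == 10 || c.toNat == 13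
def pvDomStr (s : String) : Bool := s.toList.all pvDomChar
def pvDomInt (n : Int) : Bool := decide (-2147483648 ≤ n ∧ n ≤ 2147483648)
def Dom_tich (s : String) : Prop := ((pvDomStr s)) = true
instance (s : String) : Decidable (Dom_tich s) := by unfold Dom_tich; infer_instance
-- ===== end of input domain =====

-- B replaces A's index loop (parity test + boolean flag) by a collect-then-multiply
-- decomposition over every-second-character suffixes (objective: simpler; no speed claim).

-- int(c) for a one-character string; Pre_tich excludes the inputs where Python's int raises,
-- so the .getD 0 default is never observed under the claim
def pyIntChar (c : Char) : Int := (PySem.Int.ofChars? [c]).getD 0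

-- ===== PORT A =====
-- for i in range(len(s)): i ranges over 0 ≤ i < len(s), so Nat indices and List.getD are exact
def tich (s : String) : Int :=
  let cs := s.toList
  let st := (List.range cs.length).foldl
    (fun (acc : Int × Bool) i =>
      if i % 2 = 0 then
        if pyIntChar (cs.getD i ' ') ≠ 0 then (acc.1 * pyIntChar (cs.getD i ' '), true)
        else acc
      else acc) (1, false)
  if st.2 = false then 0 else st.1

-- ===== PORT B =====
-- the while loop of Source B: step rest = rest[2:], collecting int(rest[0]) when rest[0] != '0'
def collectB : List Char → List Int
  | [] => []
  | c :: rest =>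
      (if c ≠ '0' then [pyIntChar c] else []) ++ collectB (rest.drop 1)
termination_by l => l.length
decreasing_by simp

def tich_alt (s : String) : Int :=
  let vals := collectB s.toList
  if vals = [] then 0 else vals.foldl (· * ·) 1

-- ===== PRECONDITION & SPEC =====
-- Pre_: every character at an even index is a decimal digit — exactly the inputs on which
-- A's int(s[i]) never raises ValueError
def Pre_tich (s : String) : Prop :=
  ∀ i ∈ List.range s.toList.length, i % 2 = 0 →
    s.toList.getD i ' ' ∈ ['0','1','2','3','4','5','6','7','8','9']
instance (s : String) : Decidable (Pre_tich s) := by unfold Pre_tich; infer_instance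
def pvWitness_tich : String := "105"

def Spec_tich (s : String) (out : Int) : Prop := out = tich_alt s
instance (s : String) (out : Int) : Decidable (Spec_tich s out) := by unfold Spec_tich; infer_instance

-- ===== CLAIM (what is proved, stated in full; the proofs are below) =====
def Claim_equal_tich : Prop := ∀ (s : String), Dom_tich s → Pre_tich s → Spec_tich s (tich s)

-- ===== LEMMAS AND PROOFS =====

-- the characters at even indices, in order (proof-only helper)
def evens : List Char → List Char
  | [] => []
  | c :: rest => c :: evens (rest.drop 1)
termination_by l => l.length
decreasing_by simp

-- A's loop body, restricted to the even positions it acts on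
def stepA (acc : Int × Bool) (c : Char) : Int × Bool :=
  if pyIntChar c ≠ 0 then (acc.1 * pyIntChar c, true) else acc

lemma range_add_two (n : Nat) :
    List.range (n + 2) = 0 :: 1 :: (List.range n).map (fun k => k + 2) := by
  rw [show n + 2 = (n+1)+1 from rfl, List.range_succ_eq_map, List.range_succ_eq_map]
  simp [List.map_map, Function.comp]

-- A's index loop is a fold of stepA over the even-position characters
lemma A_fold (cs : List Char) (acc : Int × Bool) :
    (List.range cs.length).foldl
      (fun (acc : Int × Bool) i =>
        if i % 2 = 0 then
          if pyIntChar (cs.getD i ' ') ≠ 0 then (acc.1 * pyIntChar (cs.getD i ' '), true)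
          else acc
        else acc) acc = (evens cs).foldl stepA acc := by
  induction cs using evens.induct generalizing acc with
  | case1 => simp [evens]
  | case2 c rest ih =>
    match rest with
    | [] => simp [evens, stepA, List.range_succ]
    | d :: rest' =>
      show (List.range (rest'.length + 2)).foldl _ acc = _
      rw [range_add_two]
      simp only [List.foldl_cons, List.foldl_map]
      rw [show evens (c :: d :: rest') = c :: evens rest' from by rw [evens]; rfl]
      simp only [List.foldl_cons]
      have h2 : ∀ (a : Int × Bool),
          (List.range rest'.length).foldl
            (fun (acc : Int × Bool) k =>
              if (k+2) % 2 = 0 then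
                if pyIntChar ((c::d::rest').getD (k+2) ' ') ≠ 0 then
                  (acc.1 * pyIntChar ((c::d::rest').getD (k+2) ' '), true)
                else acc
              else acc) a
          = (evens rest').foldl stepA a := by
        intro a
        have ih' := ih a
        simp only [List.drop_succ_cons, List.drop_zero] at ih'
        rw [← ih']
        apply PySem.List.foldl_congr_mem
        intro x k _
        simp [Nat.add_mod_right]
      rw [← h2 _]
      congr 1

-- Source B's collecting while loop = filter + map over the even-position characters
lemma collectB_eq (cs : List Char) :
    collectB cs = ((evens cs).filter (fun c => c ≠ '0')).map pyIntChar := by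
  induction cs using evens.induct with
  | case1 => simp [collectB, evens]
  | case2 c rest ih =>
    rw [collectB, evens, ih]
    by_cases hc : c = '0' <;> simp [hc]

lemma mem_evens {a : Char} {cs : List Char} (h : a ∈ evens cs) :
    ∃ i, i ∈ List.range cs.length ∧ i % 2 = 0 ∧ cs.getD i ' ' = a := by
  induction cs using evens.induct with
  | case1 => simp [evens] at h
  | case2 c rest ih =>
    rw [evens] at h
    rcases List.mem_cons.mp h with h | h
    · exact ⟨0, by simp, by simp, by simp [h]⟩
    · match rest with
      | [] => simp [evens] at h
      | d :: rest' =>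
        obtain ⟨i, hi, hpar, hget⟩ := ih h
        simp only [List.drop_succ_cons, List.drop_zero] at hi hget
        refine ⟨i + 2, ?_, ?_, ?_⟩
        · simp at hi ⊢; omega
        · omega
        · simpa using hget

lemma foldl_mul_int (l : List Int) (m : Int) :
    l.foldl (· * ·) m = m * l.foldl (· * ·) 1 := by
  induction l generalizing m with
  | nil => simp
  | cons a l ih => simp only [List.foldl_cons]; rw [ih (m * a), ih (1 * a)]; ring

lemma digit_nonzero {c : Char}
    (hd : c ∈ ['0','1','2','3','4','5','6','7','8','9']) (hne : c ≠ '0') :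
    pyIntChar c ≠ 0 := by
  fin_cases hd <;> first | exact absurd rfl hne | decide

-- the fold of A's step carries exactly (product of collected values, "some value seen")
lemma fold_stepA (l : List Char)
    (hd : ∀ c ∈ l, c ∈ ['0','1','2','3','4','5','6','7','8','9'])
    (m : Int) (b : Bool) :
    l.foldl stepA (m, b) =
      (m * ((l.filter (fun c => c ≠ '0')).map pyIntChar).foldl (· * ·) 1,
       b || !((l.filter (fun c => c ≠ '0')).map pyIntChar).isEmpty) := by
  induction l generalizing m b with
  | nil => simp
  | cons c l ih =>
    have hdl : ∀ x ∈ l, x ∈ ['0','1','2','3','4','5','6','7','8','9'] :=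
      fun x hx => hd x (List.mem_cons_of_mem _ hx)
    by_cases hc : c = '0'
    · subst hc
      simp only [List.foldl_cons, show stepA (m, b) '0' = (m, b) from rfl]
      rw [ih hdl m b]
      simp
    · have hnz := digit_nonzero (hd c (List.mem_cons_self ..)) hc
      simp only [List.foldl_cons, stepA, if_pos hnz, List.filter_cons]
      rw [ih hdl]
      rw [if_pos (show decide (c ≠ '0') = true by simpa using hc)]
      simp only [List.map_cons, List.foldl_cons, List.isEmpty_cons, Bool.true_or]
      rw [foldl_mul_int _ (1 * pyIntChar c)]
      simp only [Prod.mk.injEq]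
      refine ⟨by ring, by simp⟩

-- ===== VERDICT (by name: the statement is the Claim_ definition above) =====
theorem tich_spec : Claim_equal_tich := by
  intro s _hDom hPre
  unfold Spec_tich tich tich_alt
  simp only []
  rw [A_fold]
  have hdig : ∀ c ∈ evens s.toList, c ∈ ['0','1','2','3','4','5','6','7','8','9'] := by
    intro c hc
    obtain ⟨i, hi, hp, hg⟩ := mem_evens hc
    exact hg ▸ hPre i hi hp
  rw [fold_stepA _ hdig, collectB_eq]
  by_cases h : ((evens s.toList).filter (fun c => c ≠ '0')).map pyIntChar = []
  · rw [h]
    simp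
  · simp
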